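-- pv_equiv track=rewrite | github.com/sofasolver/cybertalent_ctf_2023 | 2_2_1_klassisk_krypto.py | get_independent_row
-- ===== SOURCE A (Python) =====
-- from itertools import count, chain, product
-- from collections.abc import Iterable
--
-- Square = dict[str, tuple[int,int]]
--
-- def get_independent_row(square_a: Square, square_b: Square, row_space: Iterable[int]) -> int:
--     """
--     Find a number in row_space which is not the row of any element from square_a nor square_b
--     """
--     used_rows = set(chain(
--         (r for r, _ in square_a.values()),
--         (r for r, _ in square_b.values())
--     ))
--
--     for row in row_space:
--         if row not in used_rows:
--             return row
--
--     assert False, "Unreachable code"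
-- ===== SOURCE B (Python) =====
-- def get_independent_row(square_a, square_b, row_space):
--     """
--     Find a number in row_space which is not the row of any element from square_a nor square_b
--     """
--     candidates = dict.fromkeys(row_space)
--     for r, _ in list(square_a.values()) + list(square_b.values()):
--         candidates.pop(r, None)
--     return next(iter(candidates))
-- ===== Notes on version B (the rewrite author's own statement) =====
-- stated objective: alternative
-- what changed: Inverts the traversal: instead of scanning row_space and testing each candidate against a precomputed used-row set, B builds an ordered candidate dict from row_space, iterates over the squares' value tuples popping each used row out of it, and returns the first remaining key; on exhaustion B raises StopIteration where A raises AssertionError (both outside Pre_).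
import Mathlib
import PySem

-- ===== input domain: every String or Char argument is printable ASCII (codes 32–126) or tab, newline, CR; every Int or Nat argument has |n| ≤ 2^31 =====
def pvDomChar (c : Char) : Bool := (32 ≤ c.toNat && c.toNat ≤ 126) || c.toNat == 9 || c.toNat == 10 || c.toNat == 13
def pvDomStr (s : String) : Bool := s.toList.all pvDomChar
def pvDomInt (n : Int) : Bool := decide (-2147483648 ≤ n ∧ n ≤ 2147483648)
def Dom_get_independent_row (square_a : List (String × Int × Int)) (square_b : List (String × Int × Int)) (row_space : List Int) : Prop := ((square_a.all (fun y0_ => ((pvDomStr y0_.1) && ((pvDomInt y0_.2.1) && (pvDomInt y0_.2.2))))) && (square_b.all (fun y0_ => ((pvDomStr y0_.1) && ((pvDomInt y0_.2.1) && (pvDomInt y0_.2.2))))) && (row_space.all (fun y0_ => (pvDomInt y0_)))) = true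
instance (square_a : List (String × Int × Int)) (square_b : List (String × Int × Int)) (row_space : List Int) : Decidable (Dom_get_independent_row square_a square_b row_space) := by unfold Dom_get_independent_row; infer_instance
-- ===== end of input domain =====

-- B inverts the traversal: it builds an ordered candidate dict from row_space, pops each used row
-- out of it while iterating over the squares' values, and returns the first remaining key;
-- same return value on Pre_ (alternative decomposition, not claimed faster).
-- ===== PORT A =====
-- for row in row_space: return the first row not in used_rows; 0 stands in for the
-- unreachable `assert False` (excluded by Pre_)
def pvLoopA (used : PySem.Set Int) : List Int → Int
  | [] => 0
  | row :: rest => if PySem.Set.contains used row then pvLoopA used rest else row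

def get_independent_row (square_a : List (String × Int × Int)) (square_b : List (String × Int × Int)) (row_space : List Int) : Int :=
  let used : PySem.Set Int :=
    PySem.Set.ofList (((PySem.Dict.ofList square_a).values.map (·.1)) ++ ((PySem.Dict.ofList square_b).values.map (·.1)))
  pvLoopA used row_space

-- ===== PORT B =====
-- candidates = dict.fromkeys(row_space); pop each used row; next(iter(candidates)) is the first
-- remaining key; 0 stands in for the StopIteration on an empty dict (excluded by Pre_)
def get_independent_row_alt (square_a : List (String × Int × Int)) (square_b : List (String × Int × Int)) (row_space : List Int) : Int :=
  let candidates : PySem.Dict Int (Option Int) := PySem.Dict.ofList (row_space.map (fun r => (r, none)))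
  let final := (((PySem.Dict.ofList square_a).values.map (·.1)) ++ ((PySem.Dict.ofList square_b).values.map (·.1))).foldl
    (fun d r => d.erase r) candidates
  final.keys.headD 0

-- ===== PRECONDITION & SPEC =====
-- Exactly the inputs on which A returns (B too): some row of row_space is not the first component
-- of any value of either dict; otherwise A hits `assert False` (AssertionError) and B's next() raises StopIteration.
def Pre_get_independent_row (square_a : List (String × Int × Int)) (square_b : List (String × Int × Int)) (row_space : List Int) : Prop :=
  ∃ row ∈ row_space,
    (∀ p ∈ (PySem.Dict.ofList square_a).values, p.1 ≠ row) ∧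
    (∀ p ∈ (PySem.Dict.ofList square_b).values, p.1 ≠ row)
instance (square_a : List (String × Int × Int)) (square_b : List (String × Int × Int)) (row_space : List Int) : Decidable (Pre_get_independent_row square_a square_b row_space) := by unfold Pre_get_independent_row; infer_instance

def pvWitness_get_independent_row : (List (String × Int × Int)) × (List (String × Int × Int)) × List Int :=
  ([("a", (1, 2))], [("b", (3, 4))], [1, 3, 5])

def Spec_get_independent_row (square_a : List (String × Int × Int)) (square_b : List (String × Int × Int)) (row_space : List Int) (out : Int) : Prop := out = get_independent_row_alt square_a square_b row_space
instance (square_a : List (String × Int × Int)) (square_b : List (String × Int × Int)) (row_space : List Int) (out : Int) : Decidable (Spec_get_independent_row square_a square_b row_space out) := by unfold Spec_get_independent_row; infer_instance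

-- ===== CLAIM =====
def Claim_equal_get_independent_row : Prop := ∀ (square_a : List (String × Int × Int)) (square_b : List (String × Int × Int)) (row_space : List Int), Dom_get_independent_row square_a square_b row_space → Pre_get_independent_row square_a square_b row_space → Spec_get_independent_row square_a square_b row_space (get_independent_row square_a square_b row_space)

-- ===== LEMMAS AND PROOFS =====
-- A's scan for the first row outside `used` = the first candidate surviving the filter
lemma pv_loopA_eq_find (L : List Int) (rs : List Int) :
    pvLoopA (PySem.Set.ofList L) rs = (rs.find? (fun row => !(L.contains row))).getD 0 := by
  induction rs with
  | nil => rfl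
  | cons row rest ih =>
      have hc : PySem.Set.contains (PySem.Set.ofList L) row = L.contains row := by
        rw [Bool.eq_iff_iff]
        simp [PySem.Set.contains_eq_listContains, PySem.Set.mem_ofList, List.contains_eq_mem]
      simp only [pvLoopA, hc, List.find?_cons]
      rcases h : L.contains row <;> simp [ih]

-- erasing one key filters it out of the key list
lemma pv_keys_erase (d : PySem.Dict Int (Option Int)) (k : Int) :
    (d.erase k).keys = d.keys.filter (fun x => !(x == k)) := by
  simp only [PySem.Dict.erase, PySem.Dict.keys, List.filter_map]
  congr 1

-- B's pop loop = one filter of the key list by non-membership in the popped rows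
lemma pv_keys_foldl_erase (L : List Int) (d : PySem.Dict Int (Option Int)) :
    (L.foldl (fun d r => d.erase r) d).keys = d.keys.filter (fun k => !(L.contains k)) := by
  induction L generalizing d with
  | nil => simp
  | cons r L ih =>
      simp only [List.foldl_cons, ih, pv_keys_erase, List.filter_filter, List.contains_cons]
      congr 1
      funext row
      by_cases h : row = r <;> simp [h, Bool.and_comm]

-- dict.fromkeys keeps the first occurrence of each row, in order
lemma pv_keys_fromkeys (rs : List Int) :
    (PySem.Dict.ofList (rs.map (fun r => (r, (none : Option Int))))).keys = PySem.Set.ofList rs := by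
  simp [pysem, PySem.Dict.ofList, PySem.Dict.update, PySem.Set.ofList, PySem.Set.empty]

-- the first match in the deduplicated list is the first match in the original list
lemma pv_find_foldl_add (p : Int → Bool) (acc : PySem.Set Int) (xs : List Int) :
    (List.foldl PySem.Set.add acc xs).find? p = (acc ++ xs).find? p := by
  induction xs generalizing acc with
  | nil => simp
  | cons x xs ih =>
      simp only [List.foldl_cons, ih, PySem.Set.add]
      have hmem : (PySem.Set.contains acc x = true) ↔ x ∈ acc := by
        simp [PySem.Set.contains_eq_listContains, List.contains_eq_mem]
      by_cases h : x ∈ acc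
      · rw [if_pos (hmem.mpr h)]
        rcases hp : p x with _ | _
        · simp [List.find?_append, hp]
        · have hs : (acc.find? p).isSome := List.find?_isSome.mpr ⟨x, h, hp⟩
          rcases ho : acc.find? p with _ | v
          · simp [ho] at hs
          · simp [List.find?_append, ho]
      · rw [if_neg (fun hc => h (hmem.mp hc))]
        simp [List.find?_append]

-- ===== VERDICT =====
theorem get_independent_row_spec : Claim_equal_get_independent_row := by
  intro a b rs _ _
  unfold Spec_get_independent_row get_independent_row get_independent_row_alt
  simp only [pv_loopA_eq_find, pv_keys_foldl_erase, pv_keys_fromkeys,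
    List.headD_eq_head?_getD, List.head?_filter]
  rw [show PySem.Set.ofList rs = List.foldl PySem.Set.add ([] : PySem.Set Int) rs from rfl,
    pv_find_foldl_add]
  simp
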